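-- pv_equiv track=rewrite | github.com/normalize-vectors/MobiusFront83Solitaire | main.py | remove_overlapping
-- ===== SOURCE A (Python) =====
-- def is_overlapping(box1, box2):
--
--     left1, top1, width1, height1 = box1
--     left2, top2, width2, height2 = box2
--
--     right1 = left1 + width1
--     right2 = left2 + width2
--     bottom1 = top1 + height1
--     bottom2 = top2 + height2
--
--     # Check for overlap
--     if left1 < right2 and right1 > left2 and top1 < bottom2 and bottom1 > top2:
--         return True
--     else:
--         return False
--
-- def remove_overlapping(boxes):
--
--     non_overlapping_boxes = []
--
--     for i in range(len(boxes)):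
--         box = boxes[i]
--         overlap = False
--
--         for j in range(i + 1, len(boxes)):
--             other_box = boxes[j]
--
--             if is_overlapping(box[1], other_box[1]):
--                 overlap = True
--                 break
--
--         if not overlap:
--             non_overlapping_boxes.append(box)
--
--     return non_overlapping_boxes
-- ===== SOURCE B (Python) =====
-- def remove_overlapping(boxes):
--     # Single forward pass with eviction: each newly seen box evicts every earlier
--     # candidate it overlaps, then joins the candidate list; survivors are exactly
--     # the boxes overlapping no later-indexed box.
--     candidates = []
--     for name, (l, t, w, h) in boxes:
--         candidates = [(n2, (l2, t2, w2, h2))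
--                       for (n2, (l2, t2, w2, h2)) in candidates
--                       if not (l2 < l + w and l < l2 + w2 and t2 < t + h and t < t2 + h2)]
--         candidates.append((name, (l, t, w, h)))
--     return candidates
-- ===== Notes on version B (the rewrite author's own statement) =====
-- stated objective: alternative
-- what changed: Replaces A's per-element lookahead (for each i, scan boxes[i+1:] with break) by a single forward eviction pass: a candidate list from which each newly seen box removes every earlier overlapping candidate before joining it; survivors are returned.
import Mathlib
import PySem

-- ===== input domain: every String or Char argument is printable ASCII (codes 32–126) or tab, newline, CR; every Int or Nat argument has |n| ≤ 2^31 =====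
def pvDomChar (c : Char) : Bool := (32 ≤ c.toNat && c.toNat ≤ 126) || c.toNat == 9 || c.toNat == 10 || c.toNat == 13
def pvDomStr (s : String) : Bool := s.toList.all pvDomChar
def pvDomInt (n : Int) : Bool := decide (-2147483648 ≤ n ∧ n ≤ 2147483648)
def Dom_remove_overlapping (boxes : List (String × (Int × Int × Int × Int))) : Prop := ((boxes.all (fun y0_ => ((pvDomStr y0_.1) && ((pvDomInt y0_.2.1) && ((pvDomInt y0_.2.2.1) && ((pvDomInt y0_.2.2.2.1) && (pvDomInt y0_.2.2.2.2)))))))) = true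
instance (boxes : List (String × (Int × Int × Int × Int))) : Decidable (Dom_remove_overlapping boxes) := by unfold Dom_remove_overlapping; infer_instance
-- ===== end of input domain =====

-- B replaces A's per-element lookahead scan by a single forward eviction pass over a
-- candidate list (objective: alternative; same asymptotic cost).


-- ===== PORT A =====
def is_overlapping (box1 box2 : Int × Int × Int × Int) : Bool :=
  let (left1, top1, width1, height1) := box1
  let (left2, top2, width2, height2) := box2
  let right1 := left1 + width1
  let right2 := left2 + width2
  let bottom1 := top1 + height1
  let bottom2 := top2 + height2
  if left1 < right2 ∧ right1 > left2 ∧ top1 < bottom2 ∧ bottom1 > top2 then true else false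

-- inner loop 'for j in range(i+1, len(boxes)): … break' of A, as recursion over the index list
def aInner (boxes : List (String × (Int × Int × Int × Int))) (box : Int × Int × Int × Int) :
    List Int → Bool
  | [] => false
  | j :: js =>
    let other_box := PySem.List.pyGetD boxes j default
    if is_overlapping box other_box.2 then true else aInner boxes box js

def remove_overlapping (boxes : List (String × (Int × Int × Int × Int))) :
    List (String × (Int × Int × Int × Int)) :=
  let n : Int := boxes.length
  (PySem.List.pyRange 0 n 1).foldl
    (fun non_overlapping_boxes i =>
      let box := PySem.List.pyGetD boxes i default
      let overlap := aInner boxes box.2 (PySem.List.pyRange (i + 1) n 1)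
      if overlap then non_overlapping_boxes else non_overlapping_boxes ++ [box]) []

-- ===== PORT B =====
-- Source B's inlined eviction condition: candidate c (earlier box) overlaps the new box x
def bOv (c x : Int × Int × Int × Int) : Bool :=
  decide (c.1 < x.1 + x.2.2.1) && decide (x.1 < c.1 + c.2.2.1) &&
    decide (c.2.1 < x.2.1 + x.2.2.2) && decide (x.2.1 < c.2.1 + c.2.2.2)

-- one iteration of Source B's loop: evict overlapping candidates, then append the new box
def bStep (candidates : List (String × (Int × Int × Int × Int)))
    (x : String × (Int × Int × Int × Int)) : List (String × (Int × Int × Int × Int)) :=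
  (candidates.filter (fun c => ! bOv c.2 x.2)) ++ [x]

def remove_overlapping_alt (boxes : List (String × (Int × Int × Int × Int))) :
    List (String × (Int × Int × Int × Int)) :=
  boxes.foldl bStep []

-- ===== PRECONDITION & SPEC =====
def Spec_remove_overlapping (boxes : List (String × (Int × Int × Int × Int))) (out : List (String × (Int × Int × Int × Int))) : Prop := out = remove_overlapping_alt boxes
instance (boxes : List (String × (Int × Int × Int × Int))) (out : List (String × (Int × Int × Int × Int))) : Decidable (Spec_remove_overlapping boxes out) := by unfold Spec_remove_overlapping; infer_instance

-- ===== CLAIM (what is proved, stated in full; the proofs are below) =====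
def Claim_equal_remove_overlapping : Prop := ∀ (boxes : List (String × (Int × Int × Int × Int))), Dom_remove_overlapping boxes → Spec_remove_overlapping boxes (remove_overlapping boxes)

-- ===== LEMMAS AND PROOFS =====

-- reference function: keep a box iff it overlaps none of the boxes after it
def spec : List (String × (Int × Int × Int × Int)) → List (String × (Int × Int × Int × Int))
  | [] => []
  | x :: rest =>
    if rest.any (fun y => is_overlapping x.2 y.2) then spec rest else x :: spec rest

theorem bOv_eq (c x : Int × Int × Int × Int) : bOv c x = is_overlapping c x := by
  obtain ⟨l2, t2, w2, h2⟩ := c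
  obtain ⟨l, t, w, h⟩ := x
  simp only [bOv, is_overlapping]
  by_cases hA : l2 < l + w <;> by_cases hB : l < l2 + w2 <;>
    by_cases hC : t2 < t + h <;> by_cases hD : t < t2 + h2 <;> simp_all [Bool.and_assoc]

theorem spec_append (l : List (String × (Int × Int × Int × Int)))
    (x : String × (Int × Int × Int × Int)) :
    spec (l ++ [x]) = (spec l).filter (fun c => ! is_overlapping c.2 x.2) ++ [x] := by
  induction l with
  | nil => simp [spec]
  | cons y rest ih =>
    simp only [List.cons_append, spec, List.any_append, List.any_cons, List.any_nil]
    by_cases h1 : rest.any (fun z => is_overlapping y.2 z.2)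
    · simp [h1, ih]
    · by_cases h2 : is_overlapping y.2 x.2
      · simp [h1, h2, ih]
      · simp [h1, h2, ih]

theorem b_eq_spec (l : List (String × (Int × Int × Int × Int))) :
    l.foldl bStep [] = spec l := by
  induction l using List.reverseRecOn with
  | nil => simp [spec]
  | append_singleton l x ih =>
    rw [List.foldl_append, List.foldl_cons, List.foldl_nil, ih, spec_append]
    simp only [bStep, bOv_eq]

theorem aInner_eq (boxes : List (String × (Int × Int × Int × Int)))
    (b : Int × Int × Int × Int) (i : Nat) (h : i ≤ boxes.length) :
    aInner boxes b (PySem.List.pyRange (i : Int) boxes.length 1)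
      = (boxes.drop i).any (fun y => is_overlapping b y.2) := by
  induction hk : boxes.length - i generalizing i with
  | zero =>
    have hi : i = boxes.length := by omega
    rw [PySem.List.pyRange_one_eq_nil (by omega)]
    simp [aInner, hi]
  | succ k ih =>
    have hlt : i < boxes.length := by omega
    rw [PySem.List.pyRange_one_cons (by exact_mod_cast hlt)]
    have hget : PySem.List.pyGetD boxes (i : Int) default = boxes[i] := by
      rw [PySem.List.pyGetD_eq_getElem boxes default (by omega) (by exact_mod_cast hlt)]
      simp
    rw [List.drop_eq_getElem_cons hlt]
    simp only [aInner, hget, List.any_cons]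
    by_cases hov : is_overlapping b boxes[i].2
    · simp [hov]
    · have hc : ((i : Int) + 1) = ((i + 1 : Nat) : Int) := by push_cast; ring
      simp only [hov, if_false, Bool.false_eq_true, Bool.false_or, hc,
        ih (i + 1) (by omega) (by omega)]

theorem a_fold (boxes : List (String × (Int × Int × Int × Int))) (i : Nat)
    (h : i ≤ boxes.length) (acc : List (String × (Int × Int × Int × Int))) :
    (PySem.List.pyRange (i : Int) boxes.length 1).foldl
      (fun non_overlapping_boxes j =>
        let box := PySem.List.pyGetD boxes j default
        let overlap := aInner boxes box.2 (PySem.List.pyRange (j + 1) boxes.length 1)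
        if overlap then non_overlapping_boxes else non_overlapping_boxes ++ [box]) acc
      = acc ++ spec (boxes.drop i) := by
  induction hk : boxes.length - i generalizing i acc with
  | zero =>
    have hi : i = boxes.length := by omega
    rw [PySem.List.pyRange_one_eq_nil (by omega)]
    simp [spec, hi]
  | succ k ih =>
    have hlt : i < boxes.length := by omega
    rw [PySem.List.pyRange_one_cons (by exact_mod_cast hlt)]
    have hget : PySem.List.pyGetD boxes (i : Int) default = boxes[i] := by
      rw [PySem.List.pyGetD_eq_getElem boxes default (by omega) (by exact_mod_cast hlt)]
      simp
    have hc : ((i : Int) + 1) = ((i + 1 : Nat) : Int) := by push_cast; ring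
    rw [List.foldl_cons]
    simp only [hget, hc, aInner_eq boxes boxes[i].2 (i + 1) (by omega)]
    rw [List.drop_eq_getElem_cons hlt, spec]
    by_cases hov : (boxes.drop (i + 1)).any (fun y => is_overlapping boxes[i].2 y.2)
    · simp only [hov, if_true, ih (i + 1) (by omega) _ (by omega)]
    · simp only [hov, Bool.false_eq_true, if_false, ih (i + 1) (by omega) _ (by omega)]
      simp

-- ===== VERDICT (by name: the statement is the Claim_ definition above) =====
theorem remove_overlapping_spec : Claim_equal_remove_overlapping := by
  intro boxes _
  unfold Spec_remove_overlapping remove_overlapping remove_overlapping_alt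
  rw [b_eq_spec]
  simpa using a_fold boxes 0 (by omega) []
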